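-- pv_equiv track=rewrite | github.com/nikhila29/10XAcademy | Python programs/mtx_diagonal.py | change_diagonal
-- ===== SOURCE A (Python) =====
-- def change_diagonal(arr):
-- 	n=len(arr)
-- 	for i in range(n):
-- 		for j in range(n):
-- 			if i==j:
-- 				if arr[i][j]>=0:
-- 					arr[i][j]=1
-- 				else:
-- 					arr[i][j]=0
-- 	return arr
-- ===== SOURCE B (Python) =====
-- def change_diagonal(arr):
-- 	# Single pass over the rows (mutates arr in place, like the original).
-- 	for i, row in enumerate(arr):
-- 		row[i] = 1 if row[i] >= 0 else 0
-- 	return arr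
-- ===== Notes on version B (the rewrite author's own statement) =====
-- stated objective: faster
-- what changed: Replaced the nested i,j scan over the whole n*n index grid with a single enumerate pass that touches only the diagonal entry of each row.
import Mathlib
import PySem

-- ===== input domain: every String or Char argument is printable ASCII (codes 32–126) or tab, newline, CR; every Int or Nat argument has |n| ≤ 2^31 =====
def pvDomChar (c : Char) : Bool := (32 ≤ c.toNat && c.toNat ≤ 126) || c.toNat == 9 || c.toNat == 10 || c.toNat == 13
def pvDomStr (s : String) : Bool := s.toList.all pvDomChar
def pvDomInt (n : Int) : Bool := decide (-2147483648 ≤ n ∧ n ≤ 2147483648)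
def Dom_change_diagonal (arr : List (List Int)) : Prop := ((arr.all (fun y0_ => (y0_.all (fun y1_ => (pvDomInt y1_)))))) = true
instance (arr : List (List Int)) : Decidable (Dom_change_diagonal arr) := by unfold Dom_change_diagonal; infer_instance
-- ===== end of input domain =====

-- B replaces A's nested scan of the whole n*n index grid by one enumerate pass over the rows;
-- in Python both A and B mutate arr in place, the equivalence proved here is about the return value.

-- ===== PORT A =====
-- n = len(arr); for i in range(n): for j in range(n): if i==j: arr[i][j] = 1 if arr[i][j]>=0 else 0
def change_diagonal (arr : List (List Int)) : List (List Int) :=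
  (List.range arr.length).foldl (fun a i =>
    (List.range arr.length).foldl (fun a j =>
      if i = j then
        if 0 ≤ (a.getD i []).getD j 0 then
          a.set i ((a.getD i []).set j 1)
        else
          a.set i ((a.getD i []).set j 0)
      else a) a) arr

-- ===== PORT B =====
-- for i, row in enumerate(arr): row[i] = 1 if row[i] >= 0 else 0
def change_diagonal_altGo (i : Nat) : List (List Int) → List (List Int)
  | [] => []
  | row :: rest =>
      (row.set i (if 0 ≤ row.getD i 0 then 1 else 0)) :: change_diagonal_altGo (i + 1) rest

def change_diagonal_alt (arr : List (List Int)) : List (List Int) :=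
  change_diagonal_altGo 0 arr

-- ===== PRECONDITION & SPEC =====
-- Pre_ excludes exactly the inputs where Python A raises IndexError: some row i shorter than
-- i+1, so that arr[i][i] does not exist.
def Pre_change_diagonal (arr : List (List Int)) : Prop :=
  ∀ i ∈ List.range arr.length, i < (arr.getD i []).length
instance (arr : List (List Int)) : Decidable (Pre_change_diagonal arr) := by
  unfold Pre_change_diagonal; infer_instance

def pvWitness_change_diagonal : List (List Int) := [[1, -2], [-3, 4]]

def Spec_change_diagonal (arr : List (List Int)) (out : List (List Int)) : Prop := out = change_diagonal_alt arr
instance (arr : List (List Int)) (out : List (List Int)) : Decidable (Spec_change_diagonal arr out) := by unfold Spec_change_diagonal; infer_instance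

-- ===== CLAIM (what is proved, stated in full; the proofs are below) =====
def Claim_equal_change_diagonal : Prop := ∀ (arr : List (List Int)), Dom_change_diagonal arr → Pre_change_diagonal arr → Spec_change_diagonal arr (change_diagonal arr)

-- ===== LEMMAS AND PROOFS =====

-- the single-cell transformation both programs apply at diagonal index i
def pvT (i : Nat) (row : List Int) : List Int :=
  row.set i (if 0 ≤ row.getD i 0 then 1 else 0)

def pvUpd (a : List (List Int)) (i : Nat) : List (List Int) :=
  a.set i (pvT i (a.getD i []))

-- A's inner loop over j performs pvUpd at j = i exactly once (when i < n)
theorem inner_loop_eq (n i : Nat) (a : List (List Int)) :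
    (List.range n).foldl (fun a j =>
      if i = j then
        if 0 ≤ (a.getD i []).getD j 0 then
          a.set i ((a.getD i []).set j 1)
        else
          a.set i ((a.getD i []).set j 0)
      else a) a
    = if i < n then pvUpd a i else a := by
  induction n with
  | zero => simp
  | succ m ih =>
    rw [List.range_succ, List.foldl_append, ih, List.foldl_cons, List.foldl_nil]
    rcases Nat.lt_trichotomy i m with h | h | h
    · rw [if_pos h, if_neg (by omega : ¬ i = m), if_pos (by omega)]
    · subst h
      rw [if_neg (Nat.lt_irrefl i), if_pos rfl, if_pos (Nat.lt_succ_self i)]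
      unfold pvUpd pvT
      by_cases hv : (0 : Int) ≤ (a.getD i []).getD i 0
      · rw [if_pos hv, if_pos hv]
      · rw [if_neg hv, if_neg hv]
    · rw [if_neg (show ¬ i = m by omega), if_neg (show ¬ i < m by omega),
          if_neg (show ¬ i < m + 1 by omega)]

theorem pv_getD_append (d : List (List Int)) (r : List Int) (t : List (List Int)) :
    (d ++ r :: t).getD d.length [] = r := by
  induction d with
  | nil => rfl
  | cons a d ih =>
    simp only [List.cons_append, List.length_cons, List.getD_cons_succ]
    exact ih

theorem pv_set_append (d : List (List Int)) (x r : List Int) (t : List (List Int)) :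
    (d ++ r :: t).set d.length x = d ++ x :: t := by
  induction d with
  | nil => rfl
  | cons a d ih =>
    show a :: (d ++ r :: t).set d.length x = a :: (d ++ x :: t)
    rw [ih]

-- processing indices done.length, …, done.length+rest.length-1 over done ++ rest transforms
-- exactly the rows of rest, which is what B's single pass does
theorem fold_range'_eq (rest done : List (List Int)) :
    (List.range' done.length rest.length).foldl pvUpd (done ++ rest)
    = done ++ change_diagonal_altGo done.length rest := by
  induction rest generalizing done with
  | nil => simp [change_diagonal_altGo]
  | cons row rest ih =>
    rw [List.length_cons, List.range'_succ, List.foldl_cons]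
    have hupd : pvUpd (done ++ row :: rest) done.length = done ++ pvT done.length row :: rest := by
      unfold pvUpd
      rw [pv_getD_append, pv_set_append]
    rw [hupd]
    have h2 := ih (done ++ [pvT done.length row])
    simp only [List.length_append, List.length_cons, List.length_nil, Nat.zero_add,
               List.append_assoc, List.singleton_append] at h2
    rw [h2]
    show done ++ pvT done.length row :: change_diagonal_altGo (done.length + 1) rest
        = done ++ change_diagonal_altGo done.length (row :: rest)
    simp only [change_diagonal_altGo, pvT]

-- ===== VERDICT (by name: the statement is the Claim_ definition above) =====
theorem change_diagonal_spec : Claim_equal_change_diagonal := by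
  intro arr _ _
  unfold Spec_change_diagonal
  have h1 : change_diagonal arr = (List.range arr.length).foldl pvUpd arr := by
    unfold change_diagonal
    refine PySem.List.foldl_congr_mem _ _ _ _ ?_
    intro a i hi
    rw [inner_loop_eq, if_pos (List.mem_range.mp hi)]
  have h2 := fold_range'_eq arr []
  simp only [List.nil_append, List.length_nil] at h2
  rw [h1, List.range_eq_range', h2]
  rfl
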